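-- pv_equiv track=rewrite | github.com/typesafehub/conductr-cli | conductr_cli/bndl_docker.py | docker_parse_cmd
-- ===== SOURCE A (Python) =====
-- def docker_parse_cmd(line):
--     """
--     Docker's `CMD` entries have several different funky formats. This parses those. Examples:
--
--     CMD ["/bin/sh" "-c"]
--     CMD ["/bin/sh", "-c"]
--     CMD "/bin/sh" "-c"
--     CMD /bin/sh -c
--     CMD /bin/sh "-c"
--
--     :param line: CMD line from docker image
--     :return: parsed array of arguments
--     """
--
--     args_line = line[3:].strip() if line.startswith('CMD') else ''
--     args_brackets = args_line.startswith('[') and args_line.endswith(']')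
--     args_portion = args_line[1:-1] if args_brackets else args_line
--
--     args = []
--     arg = ''
--     escaped = False
--     quoted = False
--
--     for c in args_portion:
--         if quoted and escaped:
--             arg += c
--             escaped = False
--         elif quoted and not escaped:
--             if c == '\\':
--                 escaped = True
--             elif c == '"':
--                 args.append(arg)
--                 quoted = False
--                 arg = ''
--             else:
--                 arg += c
--         elif not quoted and escaped:
--             arg += c
--             escaped = False
--         else:
--             # not quoted and not escaped:
--
--             if c.isspace():
--                 if arg != '':
--                     args.append(arg)
--                     arg = ''
--             elif c == '"':
--                 if arg != '':
--                     args.append(arg)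
--                     arg = ''
--
--                 quoted = True
--             elif c == ',' and args_brackets:
--                 pass
--             elif c == '\\':
--                 escaped = True
--             else:
--                 arg += c
--
--     if arg != '':
--         args.append(arg)
--
--     return args
-- ===== SOURCE B (Python) =====
-- def docker_parse_cmd(line):
--     args_line = line[3:].strip() if line.startswith('CMD') else ''
--     args_brackets = args_line.startswith('[') and args_line.endswith(']')
--     args_portion = args_line[1:-1] if args_brackets else args_line
--
--     args = []
--     cur = ''
--     n = len(args_portion)
--     i = 0
--     while i < n:
--         c = args_portion[i]
--         if c.isspace():
--             if cur:
--                 args.append(cur)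
--                 cur = ''
--             i += 1
--         elif c == ',' and args_brackets:
--             i += 1
--         elif c == '\\':
--             # escape outside quotes: next char taken literally (trailing backslash dropped)
--             if i + 1 < n:
--                 cur += args_portion[i + 1]
--             i += 2
--         elif c == '"':
--             if cur:
--                 args.append(cur)
--                 cur = ''
--             i += 1
--             buf = ''
--             closed = False
--             while i < n:
--                 d = args_portion[i]
--                 if d == '\\':
--                     if i + 1 < n:
--                         buf += args_portion[i + 1]
--                     i += 2
--                 elif d == '"':
--                     i += 1
--                     closed = True
--                     break
--                 else:
--                     buf += d
--                     i += 1
--             if closed or buf: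
--                 args.append(buf)
--         else:
--             cur += c
--             i += 1
--     if cur:
--         args.append(cur)
--     return args
-- ===== Notes on version B (the rewrite author's own statement) =====
-- stated objective: alternative
-- what changed: Replaced A's flag-driven per-character state machine (escaped/quoted booleans threaded through one loop) by a cursor scan that consumes backslash-escape pairs in one step and whole quoted regions with a dedicated inner loop.
import Mathlib
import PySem

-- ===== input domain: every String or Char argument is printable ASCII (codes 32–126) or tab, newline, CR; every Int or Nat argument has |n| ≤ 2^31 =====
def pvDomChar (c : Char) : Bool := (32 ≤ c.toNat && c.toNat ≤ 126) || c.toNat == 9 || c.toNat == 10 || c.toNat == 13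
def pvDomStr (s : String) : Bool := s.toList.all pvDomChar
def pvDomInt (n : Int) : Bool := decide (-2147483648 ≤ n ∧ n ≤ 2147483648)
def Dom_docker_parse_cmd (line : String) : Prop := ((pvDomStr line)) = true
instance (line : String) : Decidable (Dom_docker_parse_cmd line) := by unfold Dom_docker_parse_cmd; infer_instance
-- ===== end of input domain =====

-- B replaces A's flag-driven (escaped/quoted) per-character state machine by a direct
-- cursor scan that consumes escape pairs and whole quoted regions in place (alternative
-- decomposition, same O(n) cost).


-- shared preprocessing (source lines identical in Source A and Source B):
-- strip the 'CMD' prefix, detect and strip surrounding brackets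
def cmdPortion (line : String) : List Char × Bool :=
  let args_line : List Char :=
    if PySem.Chars.startswith line.toList "CMD".toList then
      PySem.Chars.strip (PySem.List.slice line.toList (some 3) none)
    else []
  let args_brackets : Bool :=
    PySem.Chars.startswith args_line ['['] && PySem.Chars.endswith args_line [']']
  let args_portion : List Char :=
    if args_brackets then PySem.List.slice args_line (some 1) (some (-1)) else args_line
  (args_portion, args_brackets)

-- ===== PORT A =====
-- the body of A's `for c in args_portion:` loop, on state (args, arg, escaped, quoted)
def cmdStepA (br : Bool) (st : List (List Char) × List Char × Bool × Bool) (c : Char) :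
    List (List Char) × List Char × Bool × Bool :=
  let (args, arg, escaped, quoted) := st
  if quoted = true ∧ escaped = true then
    (args, arg ++ [c], false, quoted)
  else if quoted = true ∧ escaped = false then
    if c = '\\' then (args, arg, true, quoted)
    else if c = '"' then (args ++ [arg], [], escaped, false)
    else (args, arg ++ [c], escaped, quoted)
  else if quoted = false ∧ escaped = true then
    (args, arg ++ [c], false, quoted)
  else
    -- not quoted and not escaped:
    if PySem.Chars.isspace c then
      if arg ≠ [] then (args ++ [arg], [], escaped, quoted) else (args, arg, escaped, quoted)
    else if c = '"' then
      ((if arg ≠ [] then args ++ [arg] else args), [], escaped, true)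
    else if c = ',' ∧ br = true then (args, arg, escaped, quoted)
    else if c = '\\' then (args, arg, true, quoted)
    else (args, arg ++ [c], escaped, quoted)

def docker_parse_cmd (line : String) : List String :=
  let (args_portion, args_brackets) := cmdPortion line
  let st := args_portion.foldl (cmdStepA args_brackets) ([], [], false, false)
  let args := if st.2.1 ≠ [] then st.1 ++ [st.2.1] else st.1
  args.map String.ofList

-- ===== PORT B =====
-- inner while-loop of Source B: consume a quoted region, handling '\' escapes;
-- returns (content, remaining input, closed?)
def quoteScan : List Char → List Char → List Char × List Char × Bool
  | [], buf => (buf, [], false)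
  | '\\' :: rest, buf =>
      match rest with
      | [] => (buf, [], false)
      | d :: rest' => quoteScan rest' (buf ++ [d])
  | '"' :: rest, buf => (buf, rest, true)
  | d :: rest, buf => quoteScan rest (buf ++ [d])

-- needed by scanB's termination proof
theorem quoteScan_len : ∀ (cs buf : List Char), (quoteScan cs buf).2.1.length ≤ cs.length := by
  intro cs buf
  induction cs, buf using quoteScan.induct <;> simp_all [quoteScan] <;> omega

-- outer while-loop of Source B
def scanB (br : Bool) : List Char → List Char → List (List Char) → List (List Char)
  | [], cur, args => if cur ≠ [] then args ++ [cur] else args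
  | c :: rest, cur, args =>
    if PySem.Chars.isspace c then
      scanB br rest [] (if cur ≠ [] then args ++ [cur] else args)
    else if c = ',' ∧ br = true then
      scanB br rest cur args
    else if c = '\\' then
      match rest with
      | [] => if cur ≠ [] then args ++ [cur] else args
      | d :: rest' => scanB br rest' (cur ++ [d]) args
    else if c = '"' then
      let args' := if cur ≠ [] then args ++ [cur] else args
      let r := quoteScan rest []
      scanB br r.2.1 [] (if r.2.2 || decide (r.1 ≠ []) then args' ++ [r.1] else args')
    else
      scanB br rest (cur ++ [c]) args
termination_by cs _ _ => cs.length
decreasing_by all_goals first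
  | exact Nat.lt_succ_of_le (quoteScan_len _ _)
  | (simp; try omega)

def docker_parse_cmd_alt (line : String) : List String :=
  let (args_portion, args_brackets) := cmdPortion line
  (scanB args_brackets args_portion [] []).map String.ofList

-- ===== PRECONDITION & SPEC =====
def Spec_docker_parse_cmd (line : String) (out : List String) : Prop := out = docker_parse_cmd_alt line
instance (line : String) (out : List String) : Decidable (Spec_docker_parse_cmd line out) := by unfold Spec_docker_parse_cmd; infer_instance

-- ===== CLAIM (what is proved, stated in full; the proofs are below) =====
def Claim_equal_docker_parse_cmd : Prop := ∀ (line : String), Dom_docker_parse_cmd line → Spec_docker_parse_cmd line (docker_parse_cmd line)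

-- ===== LEMMAS AND PROOFS =====

-- A's loop followed by the final flush, as one function of the start state
def foldFin (br : Bool) (st : List (List Char) × List Char × Bool × Bool) (cs : List Char) :
    List (List Char) :=
  let st' := cs.foldl (cmdStepA br) st
  if st'.2.1 ≠ [] then st'.1 ++ [st'.2.1] else st'.1

-- if the quoted region is not closed, the whole input was consumed
theorem quoteScan_not_closed : ∀ (cs buf : List Char),
    (quoteScan cs buf).2.2 = false → (quoteScan cs buf).2.1 = [] := by
  intro cs buf
  induction cs, buf using quoteScan.induct <;> simp_all [quoteScan]

-- A's loop in the quoted (escaped = false) state behaves like quoteScan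
theorem foldFin_quoted (br : Bool) (cs buf : List Char) :
    ∀ args, foldFin br (args, buf, false, true) cs =
      (let r := quoteScan cs buf
       if r.2.2 then foldFin br (args ++ [r.1], [], false, false) r.2.1
       else if r.1 ≠ [] then args ++ [r.1] else args) := by
  induction cs, buf using quoteScan.induct with
  | case1 buf => intro args; simp [quoteScan, foldFin]
  | case2 buf => intro args; simp [quoteScan, foldFin, cmdStepA]
  | case3 buf d rest' ih =>
      intro args
      simpa [quoteScan, foldFin, cmdStepA] using ih args
  | case4 rest buf => intro args; simp [quoteScan, foldFin, cmdStepA]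
  | case5 d rest buf h1 h2 ih =>
      intro args
      have h1' : d ≠ '\\' := fun h => h1 h
      have h2' : d ≠ '"' := fun h => h2 h
      simpa [quoteScan, foldFin, cmdStepA, h1', h2'] using ih args

-- A's loop from the neutral state equals B's scan
theorem foldFin_eq_scanB (br : Bool) (cs cur : List Char) (args : List (List Char)) :
    foldFin br (args, cur, false, false) cs = scanB br cs cur args := by
  induction cs, cur, args using scanB.induct br with
  | case1 cur args h => rw [scanB]; simp [foldFin, h]
  | case2 cur args h => rw [scanB]; simp_all [foldFin]
  | case3 c rest cur args hsp ih =>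
      rw [scanB.eq_def]
      by_cases hc : cur = [] <;> simp_all [foldFin, cmdStepA]
  | case4 c rest cur args hsp hcm ih =>
      rw [scanB.eq_def]
      obtain ⟨hc, hbr⟩ := hcm
      subst hc hbr
      simp_all [foldFin, cmdStepA]
  | case5 cur args h hs hcm =>
      rw [scanB.eq_def]; simp [foldFin, cmdStepA, h, hs]
  | case6 cur args h hs hcm =>
      rw [scanB.eq_def]; simp_all [foldFin, cmdStepA]
  | case7 cur args d rest' hs hcm ih =>
      rw [scanB.eq_def]
      simpa [foldFin, cmdStepA, hs, hcm] using ih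
  | case8 rest cur args argsP r hsp hcm hq ih =>
      have hL : foldFin br (args, cur, false, false) ('"' :: rest) =
          foldFin br ((if cur ≠ [] then args ++ [cur] else args), [], false, true) rest := by
        have hsp' : PySem.Chars.isspace '"' = false := by decide
        by_cases hc : cur = [] <;> simp [foldFin, cmdStepA, hsp', hc]
      rw [hL, foldFin_quoted br rest []]
      rw [scanB.eq_def]
      have hsp' : PySem.Chars.isspace '"' = false := by decide
      simp only [hsp', Bool.false_eq_true, if_false, reduceIte]
      by_cases hcl : (quoteScan rest []).2.2 = true
      · simpa [argsP, r, hcl] using ih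
      · have hnil := quoteScan_not_closed rest [] (by simpa using hcl)
        rw [Bool.not_eq_true] at hcl
        by_cases hb : (quoteScan rest []).1 = [] <;>
          simp_all [scanB]
  | case9 c rest cur args h1 h2 h3 h4 ih =>
      rw [scanB.eq_def]
      simpa [foldFin, cmdStepA, h1, h2, h3, h4] using ih

-- ===== VERDICT (by name: the statement is the Claim_ definition above) =====
theorem docker_parse_cmd_spec : Claim_equal_docker_parse_cmd := by
  intro line _
  show docker_parse_cmd line = docker_parse_cmd_alt line
  unfold docker_parse_cmd docker_parse_cmd_alt
  rcases h : cmdPortion line with ⟨p, b⟩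
  exact congrArg (List.map String.ofList) (foldFin_eq_scanB b p [] [])
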